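-- pv_equiv track=rewrite | github.com/cursedyash/... | MainBot/modules/admin.py | handle_slash
-- ===== SOURCE A (Python) =====
-- def handle_slash(message):
--     if "``" in message:
--         arr = list(message.split("``"))
--         i = 0
--         ret = ""
--         for el in arr:
--             if i % 2 == 0:
--                 ret += el
--             else:
--                 ret += "`" + el + "`"
--             i += 1
--         return ret
--     else:
--         return message
-- ===== SOURCE B (Python) =====
-- def handle_slash(message):
--     if "``" in message:
--         out = []
--         inside = False
--         i = 0
--         n = len(message)
--         while i < n:
--             if message[i:i+2] == "``":
--                 out.append("`")
--                 inside = not inside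
--                 i += 2
--             else:
--                 out.append(message[i])
--                 i += 1
--         if inside:
--             out.append("`")
--         return "".join(out)
--     else:
--         return message
-- ===== Notes on version B (the rewrite author's own statement) =====
-- stated objective: alternative
-- what changed: Replaced splitting on the double-backtick delimiter plus an index-parity rejoin loop by a single left-to-right scan that keeps an inside/outside toggle and emits one backtick per delimiter (plus a closing one if the toggle ends set), never materializing the segment list.
import Mathlib
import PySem

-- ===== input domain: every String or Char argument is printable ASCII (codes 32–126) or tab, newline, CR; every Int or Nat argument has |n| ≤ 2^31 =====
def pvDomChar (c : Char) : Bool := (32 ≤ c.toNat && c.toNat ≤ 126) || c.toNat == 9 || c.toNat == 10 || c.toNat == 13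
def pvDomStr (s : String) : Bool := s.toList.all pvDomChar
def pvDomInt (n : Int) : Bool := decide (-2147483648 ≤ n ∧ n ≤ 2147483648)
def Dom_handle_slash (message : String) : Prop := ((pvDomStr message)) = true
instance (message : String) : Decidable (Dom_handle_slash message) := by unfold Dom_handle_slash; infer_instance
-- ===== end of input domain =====

-- B replaces A's split-on-"``" + index-parity rejoin by a single scan with an inside/outside toggle (alternative decomposition, same O(n) cost).

-- ===== PORT A =====
-- A: if "``" in message: split on "``", rejoin wrapping odd-indexed segments in single backticks.
def handle_slash (message : String) : String :=
  if PySem.Str.isIn "``" message then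
    let arr := PySem.Chars.splitOn message.toList ['`', '`']
    let fin := arr.foldl
      (fun (st : List Char × Int) el =>
        (if PySem.Int.mod st.2 2 = 0 then st.1 ++ el else st.1 ++ '`' :: el ++ ['`'], st.2 + 1))
      ([], 0)
    String.ofList fin.1
  else message

-- ===== PORT B =====
-- B's while-loop: test message[i:i+2] == "``"; emit one '`' and flip the toggle, else copy one char;
-- after the loop, a closing '`' if the toggle is still set.
def hsScan : List Char → Bool → List Char
  | [], inside => if inside then ['`'] else []
  | [c], inside => c :: (if inside then ['`'] else [])
  | c :: d :: rest, inside =>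
      if c = '`' ∧ d = '`' then '`' :: hsScan rest (!inside)
      else c :: hsScan (d :: rest) inside

def handle_slash_alt (message : String) : String :=
  if PySem.Str.isIn "``" message then String.ofList (hsScan message.toList false)
  else message

-- ===== PRECONDITION & SPEC =====
def Spec_handle_slash (message : String) (out : String) : Prop := out = handle_slash_alt message
instance (message : String) (out : String) : Decidable (Spec_handle_slash message out) := by unfold Spec_handle_slash; infer_instance

-- ===== CLAIM (what is proved, stated in full; the proofs are below) =====
def Claim_equal_handle_slash : Prop := ∀ (message : String), Dom_handle_slash message → Spec_handle_slash message (handle_slash message)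

-- ===== LEMMAS AND PROOFS =====

-- prepend p to the head segment (empty list of segments never occurs)
def hsConsHead (p : List Char) : List (List Char) → List (List Char)
  | [] => [p]
  | s :: ss => (p ++ s) :: ss

-- the segments str.split("``") produces, by direct recursion
def hsSegs : List Char → List (List Char)
  | [] => [[]]
  | [c] => [[c]]
  | c :: d :: rest =>
      if c = '`' ∧ d = '`' then [] :: hsSegs rest
      else hsConsHead [c] (hsSegs (d :: rest))

lemma hsSegs_ne_nil (cs : List Char) : hsSegs cs ≠ [] := by
  match cs with
  | [] => simp [hsSegs]
  | [c] => simp [hsSegs]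
  | c :: d :: rest =>
      simp only [hsSegs]
      split
      · simp
      · rcases h : hsSegs (d :: rest) with _ | ⟨s, ss⟩ <;> simp [hsConsHead]

-- the tail of A's rejoin loop, from current index i
def hsF : List (List Char) → Int → List Char
  | [], _ => []
  | el :: rest, i =>
      (if i % 2 = 0 then el else '`' :: el ++ ['`']) ++ hsF rest (i + 1)

lemma hsFoldl (arr : List (List Char)) : ∀ (pre : List Char) (i : Int),
    (arr.foldl
      (fun (st : List Char × Int) el =>
        (if PySem.Int.mod st.2 2 = 0 then st.1 ++ el else st.1 ++ '`' :: el ++ ['`'], st.2 + 1))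
      (pre, i)).1 = pre ++ hsF arr i := by
  induction arr with
  | nil => intro pre i; simp [hsF]
  | cons el rest ih =>
      intro pre i
      simp only [List.foldl_cons, hsF]
      rw [ih, PySem.Int.mod_eq_emod_of_pos (by omega : (0:Int) < 2)]
      split <;> simp

lemma hs_go_spec : ∀ (fuel : Nat) (l cur : List Char) (acc : List (List Char)),
    l.length ≤ fuel →
    PySem.Chars.splitOn.go ['`', '`'] fuel l cur acc
      = acc.reverse ++ hsConsHead cur.reverse (hsSegs l) := by
  intro fuel
  induction fuel with
  | zero =>
      intro l cur acc h
      have : l = [] := by cases l <;> simp_all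
      subst this
      simp [PySem.Chars.splitOn.go, hsSegs, hsConsHead]
  | succ fuel ih =>
      intro l cur acc h
      match l with
      | [] => simp [PySem.Chars.splitOn.go, hsSegs, hsConsHead]
      | [c] =>
          have hpre : (['`', '`'] : List Char).isPrefixOf [c] = false := by
            simp [List.isPrefixOf]
          simp only [PySem.Chars.splitOn.go, hpre]
          rw [ih [] (c :: cur) acc (by simp)]
          simp [hsSegs, hsConsHead]
      | c :: d :: rest =>
          by_cases hcd : c = '`' ∧ d = '`'
          · obtain ⟨hc, hd⟩ := hcd
            subst hc; subst hd
            have hpre : (['`', '`'] : List Char).isPrefixOf ('`' :: '`' :: rest) = true := by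
              simp [List.isPrefixOf]
            simp only [PySem.Chars.splitOn.go, hpre, if_pos]
            have hdrop : List.drop (['`','`'] : List Char).length ('`' :: '`' :: rest) = rest := rfl
            rw [hdrop, ih rest [] (cur.reverse :: acc) (by simp at h ⊢; omega)]
            rcases hs : hsSegs rest with _ | ⟨s, ss⟩
            · exact absurd hs (hsSegs_ne_nil rest)
            · simp [hsSegs, hsConsHead, hs]
          · have hpre : (['`', '`'] : List Char).isPrefixOf (c :: d :: rest) = false := by
              simp [List.isPrefixOf]
              intro hc hd; exact hcd ⟨hc.symm, hd.symm⟩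
            simp only [PySem.Chars.splitOn.go, hpre]
            rw [ih (d :: rest) (c :: cur) acc (by simp at h ⊢; omega)]
            rcases hs : hsSegs (d :: rest) with _ | ⟨s, ss⟩
            · exact absurd hs (hsSegs_ne_nil _)
            · simp [hsSegs, hcd, hs, hsConsHead]

lemma hsSegs_eq_splitOn (cs : List Char) :
    PySem.Chars.splitOn cs ['`', '`'] = hsSegs cs := by
  have h := hs_go_spec (cs.length + 1) cs [] [] (by omega)
  rcases hs : hsSegs cs with _ | ⟨s, ss⟩
  · exact absurd hs (hsSegs_ne_nil cs)
  · simpa [PySem.Chars.splitOn, hs, hsConsHead] using h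

lemma hsMain : ∀ (n : Nat) (cs : List Char), cs.length ≤ n → ∀ (i : Int),
    (i % 2 = 0 → hsF (hsSegs cs) i = hsScan cs false) ∧
    (i % 2 = 1 → hsF (hsSegs cs) i = '`' :: hsScan cs true) := by
  intro n
  induction n with
  | zero =>
      intro cs h i
      have : cs = [] := by cases cs <;> simp_all
      subst this
      constructor <;> intro hp
      · simp [hsSegs, hsF, hsScan, hp]
      · simp [hsSegs, hsF, hsScan, hp]
  | succ n ih =>
      intro cs h i
      match cs with
      | [] =>
          constructor <;> intro hp
          · simp [hsSegs, hsF, hsScan, hp]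
          · simp [hsSegs, hsF, hsScan, hp]
      | [c] =>
          constructor <;> intro hp
          · simp [hsSegs, hsF, hsScan, hp]
          · simp [hsSegs, hsF, hsScan, hp]
      | c :: d :: rest =>
          have hlen : rest.length ≤ n := by simp at h ⊢; omega
          have hlen2 : (d :: rest).length ≤ n := by simp at h ⊢; omega
          by_cases hcd : c = '`' ∧ d = '`'
          · obtain ⟨hc, hd⟩ := hcd
            subst hc; subst hd
            simp only [hsSegs, hsScan]
            constructor <;> intro hp
            · have h1 : (i + 1) % 2 = 1 := by omega
              have hrec := (ih rest hlen (i + 1)).2 h1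
              simp [hsF, hp, hrec]
            · have h0 : (i + 1) % 2 = 0 := by omega
              have hrec := (ih rest hlen (i + 1)).1 h0
              simp [hsF, hp, hrec]
          · rcases hs : hsSegs (d :: rest) with _ | ⟨s, ss⟩
            · exact absurd hs (hsSegs_ne_nil _)
            · have hrec := ih (d :: rest) hlen2 i
              rw [hs] at hrec
              simp only [hsSegs, hs, hsConsHead, hsScan, if_neg hcd]
              constructor <;> intro hp
              · have := hrec.1 hp
                simp only [hsF, hp, if_pos] at this ⊢
                simp [← this]
              · have := hrec.2 hp
                have hne : ¬ ((i:Int) % 2 = 0) := by omega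
                simp only [hsF, if_neg hne] at this ⊢
                simp only [List.cons_append, List.append_assoc] at this ⊢
                simp at this
                simp [this]

-- ===== VERDICT (by name: the statement is the Claim_ definition above) =====
theorem handle_slash_spec : Claim_equal_handle_slash := by
  intro message _
  unfold Spec_handle_slash handle_slash handle_slash_alt
  rcases hin : PySem.Str.isIn "``" message
  · simp only [Bool.false_eq_true, if_false]
  · simp only [if_pos]
    rw [hsFoldl, hsSegs_eq_splitOn]
    have := (hsMain message.toList.length message.toList (le_refl _) 0).1 (by decide)
    simp [this]
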